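-- pv_equiv track=rewrite | github.com/eosbic/Ada | adav2/api/services/response_policy.py | _pick_primary_secondary
-- ===== SOURCE A (Python) =====
-- from typing import Dict, List
--
-- def _pick_primary_secondary(sources: List[Dict]) -> Dict:
--     if not sources:
--         return {"primary": "desconocida", "secondary": "desconocida"}
--
--     # Fuentes reales tienen prioridad absoluta sobre Qdrant/PostgreSQL
--     REAL_SOURCES = {
--         "google_calendar": "Google Calendar",
--         "calendar": "Google Calendar",
--         "gmail": "Gmail",
--         "gmail_service": "Gmail",
--         "plane": "Plane.so",
--         "plane_mcp": "Plane.so",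
--         "notion": "Notion",
--         "notion_mcp": "Notion",
--         "knowledge_graph": "Knowledge Graph",
--         "postgres_reports": "Base de datos",
--     }
--     QDRANT_NAMES = {"qdrant_excel_reports", "qdrant_vector_store1", "agent_memory"}
--
--     real = [s for s in sources if s.get("name", "") in REAL_SOURCES]
--     qdrant = [s for s in sources if s.get("name", "") in QDRANT_NAMES]
--     other = [s for s in sources if s.get("name", "") not in REAL_SOURCES and s.get("name", "") not in QDRANT_NAMES]
--
--     # Orden de prioridad: real > other > qdrant
--     ordered = real + other + qdrant
--
--     def display_name(s):
--         return REAL_SOURCES.get(s.get("name", ""), s.get("name", "desconocida"))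
--
--     primary = display_name(ordered[0])
--     secondary = display_name(ordered[1]) if len(ordered) > 1 else primary
--     return {"primary": primary, "secondary": secondary}
-- ===== SOURCE B (Python) =====
-- from typing import Dict, List
--
-- def _pick_primary_secondary(sources: List[Dict]) -> Dict:
--     if not sources:
--         return {"primary": "desconocida", "secondary": "desconocida"}
--
--     REAL_SOURCES = {
--         "google_calendar": "Google Calendar",
--         "calendar": "Google Calendar",
--         "gmail": "Gmail",
--         "gmail_service": "Gmail",
--         "plane": "Plane.so",
--         "plane_mcp": "Plane.so",
--         "notion": "Notion",
--         "notion_mcp": "Notion",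
--         "knowledge_graph": "Knowledge Graph",
--         "postgres_reports": "Base de datos",
--     }
--     QDRANT_NAMES = {"qdrant_excel_reports", "qdrant_vector_store1", "agent_memory"}
--
--     def rank(s):
--         name = s.get("name", "")
--         if name in REAL_SOURCES:
--             return 0
--         if name in QDRANT_NAMES:
--             return 2
--         return 1
--
--     def display_name(s):
--         return REAL_SOURCES.get(s.get("name", ""), s.get("name", "desconocida"))
--
--     # stable sort preserves original order within each priority rank
--     ordered = sorted(sources, key=rank)
--
--     primary = display_name(ordered[0])
--     secondary = display_name(ordered[1]) if len(ordered) > 1 else primary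
--     return {"primary": primary, "secondary": secondary}
-- ===== Notes on version B (the rewrite author's own statement) =====
-- stated objective: alternative
-- what changed: Replaces the three filter passes and list concatenation (real+other+qdrant) by a single stable sort of the sources under a 3-valued priority key (real=0, other=1, qdrant=2), relying on sort stability to preserve original order within each class.
import Mathlib
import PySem

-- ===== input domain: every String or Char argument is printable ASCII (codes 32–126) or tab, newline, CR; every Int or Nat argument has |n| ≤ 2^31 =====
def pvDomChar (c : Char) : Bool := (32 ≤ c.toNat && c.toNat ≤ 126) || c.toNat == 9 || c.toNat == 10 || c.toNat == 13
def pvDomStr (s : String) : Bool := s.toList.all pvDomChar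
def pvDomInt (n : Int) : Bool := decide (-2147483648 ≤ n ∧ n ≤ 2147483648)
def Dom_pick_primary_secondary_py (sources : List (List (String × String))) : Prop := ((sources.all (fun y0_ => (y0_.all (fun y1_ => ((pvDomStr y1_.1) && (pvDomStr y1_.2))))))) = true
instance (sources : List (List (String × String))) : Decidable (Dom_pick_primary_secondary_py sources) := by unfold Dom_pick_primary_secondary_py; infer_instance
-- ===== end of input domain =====

-- B replaces A's three filter passes + concatenation (real+other+qdrant) by one stable sort
-- under a 3-valued priority key; alternative decomposition, not claimed faster.

-- ===== PORT A =====
-- shared constants/helpers (identical literals in both Pythons)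
def pvReal : PySem.Dict String String := PySem.Dict.mk
  [("google_calendar","Google Calendar"),("calendar","Google Calendar"),
   ("gmail","Gmail"),("gmail_service","Gmail"),
   ("plane","Plane.so"),("plane_mcp","Plane.so"),
   ("notion","Notion"),("notion_mcp","Notion"),
   ("knowledge_graph","Knowledge Graph"),("postgres_reports","Base de datos")]

def pvQdrant : PySem.Set String :=
  PySem.Set.ofList ["qdrant_excel_reports","qdrant_vector_store1","agent_memory"]

-- s.get("name", "")
def pvGetName (s : List (String × String)) : String :=
  PySem.Dict.getD (PySem.Dict.mk s) "name" ""

-- display_name(s) = REAL_SOURCES.get(s.get("name",""), s.get("name","desconocida"))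
def pvDisplay (s : List (String × String)) : String :=
  PySem.Dict.getD pvReal (pvGetName s) (PySem.Dict.getD (PySem.Dict.mk s) "name" "desconocida")

def pick_primary_secondary_py (sources : List (List (String × String))) : List (String × String) :=
  if sources = [] then [("primary","desconocida"),("secondary","desconocida")]
  else
    let real := sources.filter (fun s => PySem.Dict.contains pvReal (pvGetName s))
    let qdrant := sources.filter (fun s => PySem.Set.contains pvQdrant (pvGetName s))
    let other := sources.filter (fun s =>
      !PySem.Dict.contains pvReal (pvGetName s) && !PySem.Set.contains pvQdrant (pvGetName s))
    let ordered := real ++ other ++ qdrant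
    let primary := pvDisplay (PySem.List.pyGetD ordered 0 [])
    let secondary := if 1 < ordered.length then pvDisplay (PySem.List.pyGetD ordered 1 []) else primary
    [("primary", primary), ("secondary", secondary)]

-- ===== PORT B =====
-- rank(s): 0 = real, 2 = qdrant, 1 = other
def pvRank (s : List (String × String)) : Int :=
  if PySem.Dict.contains pvReal (pvGetName s) then 0
  else if PySem.Set.contains pvQdrant (pvGetName s) then 2
  else 1

def pick_primary_secondary_py_alt (sources : List (List (String × String))) : List (String × String) :=
  if sources = [] then [("primary","desconocida"),("secondary","desconocida")]
  else
    let ordered := PySem.List.sorted sources pvRank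
    let primary := pvDisplay (PySem.List.pyGetD ordered 0 [])
    let secondary := if 1 < ordered.length then pvDisplay (PySem.List.pyGetD ordered 1 []) else primary
    [("primary", primary), ("secondary", secondary)]

-- ===== PRECONDITION & SPEC =====
def Spec_pick_primary_secondary_py (sources : List (List (String × String))) (out : List (String × String)) : Prop := out = pick_primary_secondary_py_alt sources
instance (sources : List (List (String × String))) (out : List (String × String)) : Decidable (Spec_pick_primary_secondary_py sources out) := by unfold Spec_pick_primary_secondary_py; infer_instance

-- ===== CLAIM (what is proved, stated in full; the proofs are below) =====
def Claim_equal_pick_primary_secondary_py : Prop := ∀ (sources : List (List (String × String))), Dom_pick_primary_secondary_py sources → Spec_pick_primary_secondary_py sources (pick_primary_secondary_py sources)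

-- ===== LEMMAS AND PROOFS =====

-- insertBy skips a prefix none of whose elements x goes before
lemma insertBy_append_right {α : Type} (before : α → α → Bool) (x : α) (as bs : List α)
    (h : ∀ a ∈ as, before x a = false) :
    PySem.List.insertBy before x (as ++ bs) = as ++ PySem.List.insertBy before x bs := by
  induction as with
  | nil => rfl
  | cons a t ih =>
    have ha := h a (List.mem_cons_self ..)
    simp only [List.cons_append, PySem.List.insertBy, ha, Bool.false_eq_true, if_false]
    exact congrArg (a :: ·) (ih (fun b hb => h b (List.mem_cons_of_mem _ hb)))

-- insertBy puts x in front when it goes before everything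
lemma insertBy_eq_cons {α : Type} (before : α → α → Bool) (x : α) (bs : List α)
    (h : ∀ y ∈ bs, before x y = true) :
    PySem.List.insertBy before x bs = x :: bs := by
  cases bs with
  | nil => rfl
  | cons y ys => simp [PySem.List.insertBy, h y (List.mem_cons_self ..)]

-- a stable sort under a {0,1,2}-valued key is the concatenation of the three fibres
lemma sorted_rank3 {α : Type} (key : α → Int) (xs : List α)
    (h : ∀ x ∈ xs, key x = 0 ∨ key x = 1 ∨ key x = 2) :
    PySem.List.sorted xs key =
      xs.filter (fun x => key x == 0) ++ xs.filter (fun x => key x == 1) ++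
      xs.filter (fun x => key x == 2) := by
  induction xs using List.reverseRecOn with
  | nil => rfl
  | append_singleton t x ih =>
    have ht : ∀ y ∈ t, key y = 0 ∨ key y = 1 ∨ key y = 2 :=
      fun y hy => h y (by simp [hy])
    have hx := h x (by simp)
    have hstep : PySem.List.sorted (t ++ [x]) key =
        PySem.List.insertBy (fun a b => decide (key a < key b)) x (PySem.List.sorted t key) := by
      rw [PySem.List.sorted_eq_foldl_insertBy, PySem.List.sorted_eq_foldl_insertBy,
        List.foldl_append, List.foldl_cons, List.foldl_nil]
    have hf0 : ∀ a ∈ t.filter (fun x => key x == 0), key a = 0 := by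
      intro a ha; have := (List.mem_filter.mp ha).2; simpa using this
    have hf1 : ∀ a ∈ t.filter (fun x => key x == 1), key a = 1 := by
      intro a ha; have := (List.mem_filter.mp ha).2; simpa using this
    have hf2 : ∀ a ∈ t.filter (fun x => key x == 2), key a = 2 := by
      intro a ha; have := (List.mem_filter.mp ha).2; simpa using this
    rw [hstep, ih ht]
    rcases hx with hx | hx | hx
    · -- key x = 0 : x goes to the end of the first fibre
      rw [List.append_assoc,
        insertBy_append_right _ x _ _ (by
          intro a ha; simp [hx, hf0 a ha]),
        insertBy_eq_cons _ x _ (by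
          intro y hy
          rcases List.mem_append.mp hy with hy | hy
          · simp [hx, hf1 y hy]
          · simp [hx, hf2 y hy])]
      simp [List.filter_append, hx]
    · -- key x = 1 : after the first two fibres
      rw [insertBy_append_right _ x _ _ (by
          intro a ha
          rcases List.mem_append.mp ha with ha | ha
          · simp [hx, hf0 a ha]
          · simp [hx, hf1 a ha]),
        insertBy_eq_cons _ x _ (by intro y hy; simp [hx, hf2 y hy])]
      simp [List.filter_append, hx]
    · -- key x = 2 : at the very end
      rw [PySem.List.insertBy_of_forall_not_before _ x _ (by
          intro y hy
          rcases List.mem_append.mp hy with hy | hy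
          · rcases List.mem_append.mp hy with hy | hy
            · simp [hx, hf0 y hy]
            · simp [hx, hf1 y hy]
          · simp [hx, hf2 y hy])]
      simp [List.filter_append, hx]

-- the literal key sets of REAL_SOURCES and QDRANT_NAMES are disjoint
lemma real_not_qdrant (s : String) (h : PySem.Dict.contains pvReal s = true) :
    PySem.Set.contains pvQdrant s = false := by
  rw [PySem.Dict.contains_iff_mem_keys] at h
  simp [pvReal, PySem.Dict.keys] at h
  rcases h with h|h|h|h|h|h|h|h|h|h <;> subst h <;> decide

lemma rank_cases (s : List (String × String)) : pvRank s = 0 ∨ pvRank s = 1 ∨ pvRank s = 2 := by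
  unfold pvRank; split_ifs <;> simp

lemma rank_f0 : (fun s => pvRank s == 0) =
    (fun s => PySem.Dict.contains pvReal (pvGetName s)) := by
  funext s; unfold pvRank; split_ifs with h1 h2
  · rw [h1]; rfl
  · rw [Bool.not_eq_true] at h1; rw [h1]; rfl
  · rw [Bool.not_eq_true] at h1; rw [h1]; rfl

lemma rank_f1 : (fun s => pvRank s == 1) =
    (fun s => !PySem.Dict.contains pvReal (pvGetName s) &&
              !PySem.Set.contains pvQdrant (pvGetName s)) := by
  funext s; unfold pvRank; split_ifs with h1 h2
  · rw [h1]; rfl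
  · rw [Bool.not_eq_true] at h1; rw [h1, h2]; rfl
  · rw [Bool.not_eq_true] at h1 h2; rw [h1, h2]; rfl

lemma rank_f2 : (fun s => pvRank s == 2) =
    (fun s => PySem.Set.contains pvQdrant (pvGetName s)) := by
  funext s; unfold pvRank; split_ifs with h1 h2
  · rw [real_not_qdrant _ h1]; rfl
  · rw [h2]; rfl
  · rw [Bool.not_eq_true] at h2; rw [h2]; rfl

-- ===== VERDICT (by name: the statement is the Claim_ definition above) =====
theorem pick_primary_secondary_py_spec : Claim_equal_pick_primary_secondary_py := by
  intro sources _
  unfold Spec_pick_primary_secondary_py pick_primary_secondary_py pick_primary_secondary_py_alt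
  by_cases h : sources = []
  · simp [h]
  · simp only [if_neg h]
    have hs : PySem.List.sorted sources pvRank =
        sources.filter (fun s => PySem.Dict.contains pvReal (pvGetName s)) ++
        sources.filter (fun s =>
          !PySem.Dict.contains pvReal (pvGetName s) && !PySem.Set.contains pvQdrant (pvGetName s)) ++
        sources.filter (fun s => PySem.Set.contains pvQdrant (pvGetName s)) := by
      rw [sorted_rank3 pvRank sources (fun x _ => rank_cases x), rank_f0, rank_f1, rank_f2]
    rw [hs]
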